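-- pv_equiv track=rewrite | github.com/ryanxd2002/learn1010 | src/game/main.py | clear_lines
-- ===== SOURCE A (Python) =====
-- def clear_lines(board):
--     """
--     Clear all completely filled rows and columns.
--
--     Mutates the board in place.
--     Returns:
--         cells_cleared, rows_cleared, cols_cleared
--     """
--     height = len(board)
--     width = len(board[0]) if height > 0 else 0
--
--     full_rows = []
--     full_cols = []
--
--     # 1) Find full rows
--     for r in range(height):
--         if all(board[r][c] != 0 for c in range(width)):
--             full_rows.append(r)
--
--     # 2) Find full columns
--     for c in range(width):
--         if all(board[r][c] != 0 for r in range(height)):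
--             full_cols.append(c)
--
--     cells_cleared = 0
--
--     # 3) Clear full rows
--     for r in full_rows:
--         for c in range(width):
--             if board[r][c] != 0:
--                 board[r][c] = 0
--                 cells_cleared += 1
--
--     # 4) Clear full columns
--     for c in full_cols:
--         for r in range(height):
--             if board[r][c] != 0:
--                 board[r][c] = 0
--                 cells_cleared += 1
--
--     return cells_cleared, len(full_rows), len(full_cols)
-- ===== SOURCE B (Python) =====
-- def clear_lines(board):
--     """
--     Clear all completely filled rows and columns.
--
--     Mutates the board in place (same final board as the original).
--     Returns:
--         cells_cleared, rows_cleared, cols_cleared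
--     """
--     height = len(board)
--     width = len(board[0]) if height else 0
--
--     # One pass over the board finds full rows and full columns together.
--     col_full = [True] * width
--     full_rows = []
--     for r in range(height):
--         row = board[r]
--         row_full = True
--         for c in range(width):
--             if row[c] == 0:
--                 row_full = False
--                 col_full[c] = False
--         if row_full:
--             full_rows.append(r)
--     full_cols = [c for c in range(width) if col_full[c]]
--
--     # Clear unconditionally; cells_cleared comes from inclusion-exclusion.
--     for r in full_rows:
--         for c in range(width):
--             board[r][c] = 0
--     for c in full_cols:
--         for r in range(height):
--             board[r][c] = 0
--
--     R, C = len(full_rows), len(full_cols)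
--     return R * width + C * height - R * C, R, C
-- ===== Notes on version B (the rewrite author's own statement) =====
-- stated objective: faster
-- what changed: B finds full rows and full columns in a single pass over the board (maintaining per-column flags) instead of A's separate row scan and column scan, clears unconditionally without per-cell tests, and computes cells_cleared by the closed form R*width + C*height - R*C instead of counting nonzero cells one by one during clearing.
-- outside the precondition, e.g. on clear_lines([[0, 0], [0]]): A returns (0, 0, 0), B raises IndexError
import Mathlib
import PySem

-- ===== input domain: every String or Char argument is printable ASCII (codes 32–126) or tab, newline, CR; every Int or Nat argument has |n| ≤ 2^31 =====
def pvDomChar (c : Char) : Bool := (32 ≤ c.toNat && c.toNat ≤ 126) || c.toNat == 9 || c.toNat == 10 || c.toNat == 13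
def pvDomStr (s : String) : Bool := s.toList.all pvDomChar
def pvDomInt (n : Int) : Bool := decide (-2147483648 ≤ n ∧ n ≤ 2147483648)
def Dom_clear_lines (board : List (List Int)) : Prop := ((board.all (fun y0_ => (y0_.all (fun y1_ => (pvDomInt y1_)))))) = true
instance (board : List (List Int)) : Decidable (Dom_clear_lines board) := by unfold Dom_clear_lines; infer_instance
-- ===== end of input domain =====

-- B replaces A's two separate full-row/full-column scans by a single pass keeping per-column
-- flags, clears unconditionally, and gets cells_cleared from the closed form R*W + C*H - R*C.
-- Both A and B mutate `board` in place (to the same final board); the equivalence proved here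
-- is about the RETURN value. Under Pre_ in-range indexing makes getD-with-default exact.

-- ===== PORT A =====
-- board[r][c] (indices always in range under Pre_; getD's default is never consulted there)
def pvCell (b : List (List Int)) (r c : Nat) : Int := (b.getD r []).getD c 0
-- board[r][c] = 0
def pvClear (b : List (List Int)) (r c : Nat) : List (List Int) :=
  b.modify r (fun row => row.set c 0)
-- A's clearing loop body: 'if board[r][c] != 0: board[r][c] = 0; cells_cleared += 1'
def pvClearAt (st : List (List Int) × Int) (r c : Nat) : List (List Int) × Int :=
  if pvCell st.1 r c != 0 then (pvClear st.1 r c, st.2 + 1) else st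

def clear_lines (board : List (List Int)) : Int × Int × Int :=
  let height := board.length
  let width := if height > 0 then (board.headD []).length else 0
  let full_rows := (List.range height).foldl
    (fun acc r => if (List.range width).all (fun c => pvCell board r c != 0) then acc ++ [r] else acc)
    ([] : List Nat)
  let full_cols := (List.range width).foldl
    (fun acc c => if (List.range height).all (fun r => pvCell board r c != 0) then acc ++ [c] else acc)
    ([] : List Nat)
  let st1 := full_rows.foldl
    (fun st r => (List.range width).foldl (fun st c => pvClearAt st r c) st) (board, (0 : Int))
  let st2 := full_cols.foldl
    (fun st c => (List.range height).foldl (fun st r => pvClearAt st r c) st) st1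
  (st2.2, (full_rows.length : Int), (full_cols.length : Int))

-- ===== PORT B =====
-- B's one-pass loop body over row r: update per-column flags, record r if the row is full
def pvRowStep (board : List (List Int)) (W : Nat) (st : List Bool × List Nat) (r : Nat) :
    List Bool × List Nat :=
  let row := board.getD r []
  let q := (List.range W).foldl
    (fun (q : Bool × List Bool) c => if row.getD c 0 == 0 then (false, q.2.set c false) else q)
    (true, st.1)
  (q.2, if q.1 then st.2 ++ [r] else st.2)

-- (B's clearing loops only mutate the board and do not influence the returned triple;
--  the port covers the returned value)
def clear_lines_alt (board : List (List Int)) : Int × Int × Int :=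
  let height := board.length
  let width := if height > 0 then (board.headD []).length else 0
  let st := (List.range height).foldl (pvRowStep board width)
    (List.replicate width true, ([] : List Nat))
  let full_cols := (List.range width).filter (fun c => st.1.getD c false)
  let R : Int := (st.2.length : Int)
  let C : Int := (full_cols.length : Int)
  (R * width + C * height - R * C, R, C)

-- ===== PRECONDITION & SPEC =====
-- Pre_ excludes ragged boards where some row is shorter than the first row: there Python A
-- raises IndexError on almost all inputs, and on the few where all()'s short-circuit lets A
-- return (e.g. [[0, 0], [0]]), B itself raises IndexError.
def Pre_clear_lines (board : List (List Int)) : Prop :=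
  ∀ row ∈ board, (board.headD []).length ≤ row.length
instance (board : List (List Int)) : Decidable (Pre_clear_lines board) := by
  unfold Pre_clear_lines; infer_instance
def pvWitness_clear_lines : List (List Int) := [[1, 0], [2, 3]]
def Spec_clear_lines (board : List (List Int)) (out : Int × Int × Int) : Prop :=
  out = clear_lines_alt board
instance (board : List (List Int)) (out : Int × Int × Int) : Decidable (Spec_clear_lines board out) := by
  unfold Spec_clear_lines; infer_instance

-- ===== CLAIM (what is proved, stated in full; the proofs are below) =====
def Claim_equal_clear_lines : Prop := ∀ (board : List (List Int)),
  Dom_clear_lines board → Pre_clear_lines board → Spec_clear_lines board (clear_lines board)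

-- ===== LEMMAS AND PROOFS =====

theorem pvCell_clear (b : List (List Int)) (r c r' c' : Nat) :
    pvCell (pvClear b r c) r' c' = if r' = r ∧ c' = c then 0 else pvCell b r' c' := by
  unfold pvCell pvClear
  simp only [List.getD_eq_getElem?_getD, List.getElem?_modify]
  by_cases hr : r = r'
  · subst hr
    cases hbr : b[r]? with
    | none => simp
    | some row =>
      simp only [Option.map_eq_map, Option.map_some, Option.getD_some, if_pos trivial,
        List.getElem?_set]
      by_cases hc : c = c'
      · subst hc
        by_cases hlt : c < row.length <;> simp [hlt]
      · have hc' : ¬(c' = c) := fun h => hc h.symm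
        simp [hc, hc']
  · have hr' : ¬(r' = r) := fun h => hr h.symm
    simp [hr, hr']

theorem length_filter_not (α : Type) (p : α → Bool) (l : List α) :
    (l.filter p).length + (l.filter (fun a => !(p a))).length = l.length := by
  induction l with
  | nil => simp
  | cons x xs ih => by_cases h : p x <;> simp [h] <;> omega

theorem A_inner_row (r : Nat) (cs : List Nat) : ∀ (b : List (List Int)) (k : Int), cs.Nodup →
    (cs.foldl (fun st c => pvClearAt st r c) (b, k)).2
        = k + ((cs.filter (fun c => pvCell b r c != 0)).length : Int)
      ∧ ∀ r' c', pvCell (cs.foldl (fun st c => pvClearAt st r c) (b, k)).1 r' c'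
        = if r' = r ∧ c' ∈ cs then 0 else pvCell b r' c' := by
  induction cs with
  | nil => intro b k _; simp
  | cons c cs ih =>
    intro b k hnd
    rw [List.nodup_cons] at hnd
    obtain ⟨hc, hnd⟩ := hnd
    rw [List.foldl_cons]
    by_cases h : pvCell b r c != 0
    · rw [show pvClearAt (b, k) r c = (pvClear b r c, k + 1) from by simp [pvClearAt, h]]
      obtain ⟨ihk, ihb⟩ := ih (pvClear b r c) (k + 1) hnd
      constructor
      · rw [ihk, List.filter_congr (q := fun c' => pvCell b r c' != 0)
          (fun x hx => by rw [pvCell_clear]; rw [if_neg]; rintro ⟨-, hxc⟩; exact hc (hxc ▸ hx))]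
        rw [List.filter_cons, if_pos h]
        push_cast [List.length_cons]
        ring
      · intro r' c'
        rw [ihb r' c', pvCell_clear]
        by_cases h1 : r' = r
        · subst h1
          by_cases h2 : c' ∈ cs
          · simp [h2]
          · by_cases h3 : c' = c <;> simp [h2, h3]
        · simp [h1]
    · rw [show pvClearAt (b, k) r c = (b, k) from by simp [pvClearAt, h]]
      obtain ⟨ihk, ihb⟩ := ih b k hnd
      have h0 : pvCell b r c = 0 := by simpa using h
      constructor
      · rw [ihk, List.filter_cons, if_neg h]
      · intro r' c'
        rw [ihb r' c']
        by_cases h1 : r' = r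
        · subst h1
          by_cases h2 : c' ∈ cs
          · simp [h2]
          · by_cases h3 : c' = c <;> simp [h2, h3, h0]
        · simp [h1]

theorem A_inner_col (c : Nat) (rs : List Nat) : ∀ (b : List (List Int)) (k : Int), rs.Nodup →
    (rs.foldl (fun st r => pvClearAt st r c) (b, k)).2
        = k + ((rs.filter (fun r => pvCell b r c != 0)).length : Int)
      ∧ ∀ r' c', pvCell (rs.foldl (fun st r => pvClearAt st r c) (b, k)).1 r' c'
        = if r' ∈ rs ∧ c' = c then 0 else pvCell b r' c' := by
  induction rs with
  | nil => intro b k _; simp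
  | cons r rs ih =>
    intro b k hnd
    rw [List.nodup_cons] at hnd
    obtain ⟨hr, hnd⟩ := hnd
    rw [List.foldl_cons]
    by_cases h : pvCell b r c != 0
    · rw [show pvClearAt (b, k) r c = (pvClear b r c, k + 1) from by simp [pvClearAt, h]]
      obtain ⟨ihk, ihb⟩ := ih (pvClear b r c) (k + 1) hnd
      constructor
      · rw [ihk, List.filter_congr (q := fun r' => pvCell b r' c != 0)
          (fun x hx => by rw [pvCell_clear]; rw [if_neg]; rintro ⟨hxr, -⟩; exact hr (hxr ▸ hx))]
        rw [List.filter_cons, if_pos h]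
        push_cast [List.length_cons]
        ring
      · intro r' c'
        rw [ihb r' c', pvCell_clear]
        by_cases h1 : c' = c
        · subst h1
          by_cases h2 : r' ∈ rs
          · simp [h2]
          · by_cases h3 : r' = r <;> simp [h2, h3]
        · simp [h1]
    · rw [show pvClearAt (b, k) r c = (b, k) from by simp [pvClearAt, h]]
      obtain ⟨ihk, ihb⟩ := ih b k hnd
      have h0 : pvCell b r c = 0 := by simpa using h
      constructor
      · rw [ihk, List.filter_cons, if_neg h]
      · intro r' c'
        rw [ihb r' c']
        by_cases h1 : c' = c
        · subst h1
          by_cases h2 : r' ∈ rs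
          · simp [h2]
          · by_cases h3 : r' = r <;> simp [h2, h3, h0]
        · simp [h1]

theorem A_clear_rows (board0 : List (List Int)) (W : Nat) (rs : List Nat) :
    ∀ (b : List (List Int)) (k : Int), rs.Nodup →
    (∀ r ∈ rs, ∀ c < W, pvCell board0 r c ≠ 0) →
    (∀ r ∈ rs, ∀ c, pvCell b r c = pvCell board0 r c) →
    (rs.foldl (fun st r => (List.range W).foldl (fun st c => pvClearAt st r c) st) (b, k)).2
        = k + (rs.length : Int) * (W : Int)
      ∧ ∀ r' c', pvCell (rs.foldl (fun st r => (List.range W).foldl (fun st c => pvClearAt st r c) st) (b, k)).1 r' c'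
        = if r' ∈ rs ∧ c' < W then 0 else pvCell b r' c' := by
  induction rs with
  | nil => intro b k _ _ _; simp
  | cons r rs ih =>
    intro b k hnd hfull hagree
    rw [List.nodup_cons] at hnd
    obtain ⟨hr, hnd⟩ := hnd
    rw [List.foldl_cons]
    obtain ⟨innk, innb⟩ := A_inner_row r (List.range W) b k List.nodup_range
    have hfil : (List.range W).filter (fun c => pvCell b r c != 0) = List.range W := by
      rw [List.filter_eq_self]
      intro c hc
      rw [List.mem_range] at hc
      have := hfull r (List.mem_cons_self ..) c hc
      rw [hagree r (List.mem_cons_self ..) c] at *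
      simpa using this
    have hst1 : (List.range W).foldl (fun st c => pvClearAt st r c) (b, k)
        = (((List.range W).foldl (fun st c => pvClearAt st r c) (b, k)).1, k + (W : Int)) := by
      rw [Prod.ext_iff]
      refine ⟨rfl, ?_⟩
      simp only [innk, hfil, List.length_range]
    rw [hst1]
    obtain ⟨ihk, ihb⟩ := ih _ (k + (W : Int)) hnd
      (fun x hx => hfull x (List.mem_cons_of_mem _ hx))
      (fun x hx c => by
        rw [innb x c]
        rw [if_neg (by rintro ⟨hxr, -⟩; exact hr (hxr ▸ hx))]
        exact hagree x (List.mem_cons_of_mem _ hx) c)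
    constructor
    · rw [ihk]; push_cast [List.length_cons]; ring
    · intro r' c'
      rw [ihb r' c', innb r' c']
      by_cases h3 : c' < W
      · by_cases h2 : r' ∈ rs
        · simp [h2, h3]
        · by_cases h1 : r' = r <;> simp [h1, h2, h3, List.mem_range]
      · simp [h3, List.mem_range]

theorem A_clear_cols (board0 : List (List Int)) (H : Nat) (FRs : List Nat) (cs : List Nat) :
    ∀ (b : List (List Int)) (k : Int), cs.Nodup →
    (∀ c ∈ cs, ∀ r < H, pvCell board0 r c ≠ 0) →
    (∀ c ∈ cs, ∀ r, pvCell b r c = if r ∈ FRs then 0 else pvCell board0 r c) →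
    (cs.foldl (fun st c => (List.range H).foldl (fun st r => pvClearAt st r c) st) (b, k)).2
      = k + (cs.length : Int)
            * (((List.range H).filter (fun r => !(decide (r ∈ FRs)))).length : Int) := by
  induction cs with
  | nil => intro b k _ _ _; simp
  | cons c cs ih =>
    intro b k hnd hfull hb
    rw [List.nodup_cons] at hnd
    obtain ⟨hc, hnd⟩ := hnd
    rw [List.foldl_cons]
    obtain ⟨innk, innb⟩ := A_inner_col c (List.range H) b k List.nodup_range
    have hfil : (List.range H).filter (fun r => pvCell b r c != 0)
        = (List.range H).filter (fun r => !(decide (r ∈ FRs))) := by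
      refine List.filter_congr (fun r hr => ?_)
      rw [List.mem_range] at hr
      rw [hb c (List.mem_cons_self ..) r]
      by_cases hmem : r ∈ FRs
      · simp [hmem]
      · simp [hmem, hfull c (List.mem_cons_self ..) r hr]
    have hst1 : (List.range H).foldl (fun st r => pvClearAt st r c) (b, k)
        = (((List.range H).foldl (fun st r => pvClearAt st r c) (b, k)).1,
           k + (((List.range H).filter (fun r => !(decide (r ∈ FRs)))).length : Int)) := by
      rw [Prod.ext_iff]
      exact ⟨rfl, by rw [innk, hfil]⟩
    rw [hst1]
    rw [ih _ _ hnd (fun x hx => hfull x (List.mem_cons_of_mem _ hx))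
      (fun x hx r => by
        rw [innb r x]
        rw [if_neg (by rintro ⟨-, hxc⟩; exact hc (hxc ▸ hx))]
        exact hb x (List.mem_cons_of_mem _ hx) r)]
    push_cast [List.length_cons]
    ring

theorem set_map_range (W : Nat) (f : Nat → Bool) (c : Nat) (v : Bool) :
    ((List.range W).map f).set c v = (List.range W).map (fun x => if x = c then v else f x) := by
  refine List.ext_getElem (by simp) (fun i h1 h2 => ?_)
  simp only [List.getElem_set, List.getElem_map, List.getElem_range]
  by_cases h : c = i
  · subst h; simp
  · rw [if_neg h, if_neg (fun h' => h h'.symm)]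

theorem B_inner (row : List Int) (cs : List Nat) : ∀ (b : Bool) (f : Nat → Bool) (W : Nat),
    cs.foldl (fun (q : Bool × List Bool) c => if row.getD c 0 == 0 then (false, q.2.set c false) else q)
        (b, (List.range W).map f)
      = (b && cs.all (fun c => row.getD c 0 != 0),
         (List.range W).map (fun x => if x ∈ cs ∧ row.getD x 0 = 0 then false else f x)) := by
  induction cs with
  | nil =>
    intro b f W
    simp only [List.foldl_nil, List.all_nil, Bool.and_true]
    refine Prod.ext rfl ?_
    simp
  | cons c cs ih =>
    intro b f W
    rw [List.foldl_cons]
    by_cases h : row.getD c 0 = 0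
    · rw [if_pos (by simpa using h), set_map_range, ih]
      refine Prod.ext ?_ ?_
      · have hb : (row[c]?.getD 0 != 0) = false := by
          rw [← List.getD_eq_getElem?_getD]; simpa using h
        simp [List.all_cons, hb]
      · refine List.map_congr_left (fun x _ => ?_)
        by_cases h1 : x = c
        · subst h1
          have h' : row[x]?.getD 0 = 0 := by rw [← List.getD_eq_getElem?_getD]; exact h
          simp [h']
        · by_cases h2 : x ∈ cs ∧ row.getD x 0 = 0
          · rw [if_pos h2, if_pos ⟨List.mem_cons_of_mem _ h2.1, h2.2⟩]
          · rw [if_neg h2, if_neg h1, if_neg ?_]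
            rintro ⟨hm, hz⟩
            rcases List.mem_cons.mp hm with h' | h'
            · exact h1 h'
            · exact h2 ⟨h', hz⟩
    · rw [if_neg (by simpa using h), ih]
      refine Prod.ext ?_ ?_
      · have hb : (row[c]?.getD 0 != 0) = true := by
          rw [← List.getD_eq_getElem?_getD]; simpa using h
        simp [List.all_cons, hb]
      · refine List.map_congr_left (fun x _ => ?_)
        by_cases h2 : x ∈ cs ∧ row.getD x 0 = 0
        · rw [if_pos h2, if_pos ⟨List.mem_cons_of_mem _ h2.1, h2.2⟩]
        · rw [if_neg h2, if_neg ?_]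
          rintro ⟨hm, hz⟩
          rcases List.mem_cons.mp hm with h' | h'
          · exact h (h' ▸ hz)
          · exact h2 ⟨h', hz⟩

theorem B_outer (board : List (List Int)) (W : Nat) (rs : List Nat) :
    ∀ (f : Nat → Bool) (acc : List Nat),
    rs.foldl (pvRowStep board W) ((List.range W).map f, acc)
      = ((List.range W).map (fun c => f c && rs.all (fun r => pvCell board r c != 0)),
         acc ++ rs.filter (fun r => (List.range W).all (fun c => pvCell board r c != 0))) := by
  induction rs with
  | nil =>
    intro f acc
    simp only [List.foldl_nil, List.all_nil, List.filter_nil, List.append_nil]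
    refine Prod.ext ?_ rfl
    simp
  | cons r rs ih =>
    intro f acc
    rw [List.foldl_cons]
    have hstep : pvRowStep board W ((List.range W).map f, acc) r
        = ((List.range W).map (fun c => f c && (pvCell board r c != 0)),
           if (List.range W).all (fun c => pvCell board r c != 0) then acc ++ [r] else acc) := by
      unfold pvRowStep
      simp only []
      rw [B_inner (board.getD r []) (List.range W) true f W]
      simp only [pvCell]
      refine Prod.ext ?_ ?_
      · simp only []
        refine List.map_congr_left (fun x hx => ?_)
        by_cases h2 : (board.getD r []).getD x 0 = 0
        · simp only [List.getD_eq_getElem?_getD] at h2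
          simp [hx, h2]
        · simp only [List.getD_eq_getElem?_getD] at h2
          simp [hx, h2, bne]
      · simp only [Bool.true_and]
        rfl
    rw [hstep, ih]
    refine Prod.ext ?_ ?_
    · simp only []
      refine List.map_congr_left (fun x _ => ?_)
      simp [List.all_cons, Bool.and_assoc]
    · simp only [List.filter_cons]
      by_cases hf : (List.range W).all (fun c => pvCell board r c != 0)
      · simp [hf]
      · simp [hf]


theorem getD_map_range (W : Nat) (g : Nat → Bool) (c : Nat) (h : c < W) :
    ((List.range W).map g).getD c false = g c := by
  rw [List.getD_eq_getElem?_getD]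
  simp [h]

-- ===== VERDICT (by name: the statement is the Claim_ definition above) =====
theorem clear_lines_spec : Claim_equal_clear_lines := by
  intro board _ _
  unfold Spec_clear_lines
  simp only [clear_lines, clear_lines_alt]
  rw [PySem.List.foldl_append_if_eq_filter, PySem.List.foldl_append_if_eq_filter]
  set H := board.length with hH
  set W := if H > 0 then (board.headD []).length else 0 with hWdef
  set p := fun r => (List.range W).all (fun c => pvCell board r c != 0) with hp
  set q := fun c => (List.range H).all (fun r => pvCell board r c != 0) with hq
  set FR := (List.range H).filter p with hFR
  set FC := (List.range W).filter q with hFC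
  -- B's one-pass fold, characterized
  have hrep : (List.replicate W true) = (List.range W).map (fun _ => true) := by simp
  rw [hrep, B_outer board W (List.range H) (fun _ => true) []]
  simp only [Bool.true_and, List.nil_append]
  rw [← hp, ← hq, ← hFR]
  -- B's column list equals A's full_cols
  have hcols : (List.range W).filter (fun c => ((List.range W).map q).getD c false) = FC := by
    refine List.filter_congr (fun c hc => ?_)
    rw [getD_map_range _ _ _ (List.mem_range.mp hc)]
  rw [hcols]
  -- A's clearing loops, characterized
  have hFRnd : FR.Nodup := List.Nodup.filter _ List.nodup_range
  have hFCnd : FC.Nodup := List.Nodup.filter _ List.nodup_range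
  have hpfull : ∀ r ∈ FR, ∀ c < W, pvCell board r c ≠ 0 := by
    intro r hr c hc
    have h1 := (List.mem_filter.mp hr).2
    simp only [hp, List.all_eq_true] at h1
    have h2 := h1 c (List.mem_range.mpr hc)
    simpa using h2
  have hqfull : ∀ c ∈ FC, ∀ r < H, pvCell board r c ≠ 0 := by
    intro c hc r hr
    have h1 := (List.mem_filter.mp hc).2
    simp only [hq, List.all_eq_true] at h1
    have h2 := h1 r (List.mem_range.mpr hr)
    simpa using h2
  obtain ⟨h3k, h3b⟩ := A_clear_rows board W FR board 0 hFRnd hpfull (fun _ _ _ => rfl)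
  set st1 := List.foldl (fun st r => List.foldl (fun st c => pvClearAt st r c) st (List.range W))
    (board, (0 : Int)) FR with hst1
  have hbchar : ∀ c ∈ FC, ∀ r, pvCell st1.1 r c = if r ∈ FR then 0 else pvCell board r c := by
    intro c hcm r
    have hcW : c < W := List.mem_range.mp (List.mem_filter.mp hcm).1
    rw [h3b r c]
    by_cases hm : r ∈ FR <;> simp [hm, hcW]
  have h4 := A_clear_cols board H FR FC st1.1 st1.2 hFCnd hqfull hbchar
  rw [show st1 = (st1.1, st1.2) from rfl, h4, h3k]
  -- counting: cells not in a full row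
  have hfilmem : (List.range H).filter (fun r => decide (r ∈ FR)) = FR := by
    refine List.filter_congr (fun r hr => ?_)
    by_cases hm : r ∈ FR
    · simp [hm, (List.mem_filter.mp hm).2]
    · simp only [hm, decide_false]
      by_cases hpr : p r
      · exact absurd (List.mem_filter.mpr ⟨hr, hpr⟩) hm
      · simp [hpr]
  have hcnt : FR.length + ((List.range H).filter (fun r => !(decide (r ∈ FR)))).length = H := by
    have h2 := length_filter_not Nat (fun r => decide (r ∈ FR)) (List.range H)
    rw [hfilmem] at h2
    simpa using h2
  refine Prod.ext ?_ rfl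
  simp only []
  rw [show (((List.range H).filter (fun r => !(decide (r ∈ FR)))).length : Int)
        = (H : Int) - (FR.length : Int) from by omega]
  ring
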